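-- pv_equiv track=rewrite | github.com/sinindra/algorithm_problem | samsung/D4/4530_극한의 청소 작업.py | count
-- ===== SOURCE A (Python) =====
-- def count(N):
--     if N > 0:
--         count = 0
--         N_str = str(N)[::-1]
--         for i in range(len(N_str)):
--             if int(N_str[i]) >= 4:
--                 N_tmp = int(N_str[i]) - 1
--             else:
--                 N_tmp = int(N_str[i])
--             if i > 0:
--                 diff = [(10 ** j) * (9 ** (i - j - 1)) for j in range(i)]
--                 count += N_tmp * ((10 ** i) - sum(diff))
--             else:
--                 count += N_tmp
--     return count
-- ===== SOURCE B (Python) =====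
-- def count(N):
--     if N > 0:
--         total = 0
--         for ch in str(N):
--             d = int(ch)
--             total = total * 9 + (d - 1 if d >= 4 else d)
--         return total
--     return 0
-- ===== Notes on version B (the rewrite author's own statement) =====
-- stated objective: simpler
-- what changed: Replaces A per-position coefficient computation (a list comprehension of power products summed anew for every digit position, over the reversed digit string) by a single left-to-right base-nine Horner accumulation over str(N).
-- outside the precondition, e.g. on count(0): A raises UnboundLocalError, B returns 0
import Mathlib
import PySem

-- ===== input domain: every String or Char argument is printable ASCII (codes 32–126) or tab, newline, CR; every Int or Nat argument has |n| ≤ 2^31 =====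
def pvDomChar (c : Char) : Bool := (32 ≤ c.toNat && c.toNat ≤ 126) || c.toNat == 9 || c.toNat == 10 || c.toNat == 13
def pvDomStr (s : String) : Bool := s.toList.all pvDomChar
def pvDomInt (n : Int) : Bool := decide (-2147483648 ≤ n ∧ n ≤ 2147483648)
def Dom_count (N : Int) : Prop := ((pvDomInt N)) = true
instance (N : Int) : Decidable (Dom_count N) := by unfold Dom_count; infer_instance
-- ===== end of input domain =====

-- B replaces A's per-position coefficient (a list comprehension summed to 10^i − Σ = 9^i)
-- by a single left-to-right base-9 Horner pass over the digits (objective: simpler).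
-- For N ≤ 0 Python A raises UnboundLocalError (excluded by Pre_count); B returns 0 there.

-- ===== PORT A =====
def count (N : Int) : Int :=
  if N > 0 then
    -- N_str = str(N)[::-1]  (on the List Char side; slice? step -1 never fails)
    let Nstr : List Char := (PySem.List.slice? (PySem.Int.toChars N) none none (-1)).getD []
    -- for i in range(len(N_str)): …
    (PySem.List.pyRange 0 (PySem.List.len Nstr) 1).foldl (fun c i =>
      -- int(N_str[i]); in-range and a digit for every i of the range, so the default is never used
      let d : Int := (PySem.Int.ofChars? [PySem.List.pyGetD Nstr i ' ']).getD 0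
      let Ntmp : Int := if d ≥ 4 then d - 1 else d
      if i > 0 then
        let diff : List Int :=
          (PySem.List.pyRange 0 i 1).map (fun j => (10 : Int) ^ j.toNat * (9 : Int) ^ (i - j - 1).toNat)
        c + Ntmp * ((10 : Int) ^ i.toNat - diff.sum)
      else
        c + Ntmp) 0
  else 0  -- Python raises UnboundLocalError here; excluded by Pre_count

-- ===== PORT B =====
def count_alt (N : Int) : Int :=
  if N > 0 then
    -- for ch in str(N): total = total * 9 + (d - 1 if d >= 4 else d)
    (PySem.Int.toChars N).foldl (fun total ch =>
      let d : Int := (PySem.Int.ofChars? [ch]).getD 0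
      total * 9 + (if d ≥ 4 then d - 1 else d)) 0
  else 0

-- ===== PRECONDITION & SPEC =====
-- Pre_count excludes exactly the inputs N ≤ 0, on which Python A raises UnboundLocalError.
def Pre_count (N : Int) : Prop := 0 < N
instance (N : Int) : Decidable (Pre_count N) := by unfold Pre_count; infer_instance
def pvWitness_count : Int := (37)

def Spec_count (N : Int) (out : Int) : Prop := out = count_alt N
instance (N : Int) (out : Int) : Decidable (Spec_count N out) := by unfold Spec_count; infer_instance

-- ===== CLAIM (what is proved, stated in full; the proofs are below) =====
def Claim_equal_count : Prop := ∀ (N : Int), Dom_count N → Pre_count N → Spec_count N (count N)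

-- ===== LEMMAS AND PROOFS =====

-- the per-digit adjusted value both programs compute from a character
def pvAdj (ch : Char) : Int :=
  let d : Int := (PySem.Int.ofChars? [ch]).getD 0
  if d ≥ 4 then d - 1 else d

-- the common positional value Σ pvAdj(mᵢ)·9^i over a list read least-significant first
def pvVal : List Char → Int
  | [] => 0
  | c :: m => pvAdj c + 9 * pvVal m

lemma pvVal_append_singleton (m : List Char) (c : Char) :
    pvVal (m ++ [c]) = pvVal m + pvAdj c * 9 ^ m.length := by
  induction m with
  | nil => simp [pvVal]
  | cons x m ih => simp [pvVal, ih]; ring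

-- B's Horner fold, fully generalized over the accumulator
lemma horner_fold (L : List Char) (acc : Int) :
    L.foldl (fun total ch =>
      let d : Int := (PySem.Int.ofChars? [ch]).getD 0
      total * 9 + (if d ≥ 4 then d - 1 else d)) acc
    = acc * 9 ^ L.length + pvVal L.reverse := by
  induction L generalizing acc with
  | nil => simp [pvVal]
  | cons c L ih =>
      simp only [List.foldl_cons, ih, List.reverse_cons, pvVal_append_singleton,
        List.length_cons, List.length_reverse, pvAdj]
      ring

-- A's geometric coefficient: 10^k − Σ_{j<k} 10^j·9^(k−1−j) = 9^k
lemma geo_sum (k : Nat) :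
    (((List.range k).map (fun j => (10 : Int) ^ j * (9 : Int) ^ (k - 1 - j))).sum)
      = 10 ^ k - 9 ^ k := by
  induction k with
  | zero => simp
  | succ k ih =>
      rw [List.range_succ_eq_map]
      simp only [List.map_cons, List.map_map, List.sum_cons]
      have h1 : ((List.range k).map ((fun j => (10 : Int) ^ j * (9 : Int) ^ (k + 1 - 1 - j)) ∘ Nat.succ)).sum
          = 10 * ((List.range k).map (fun j => (10 : Int) ^ j * (9 : Int) ^ (k - 1 - j))).sum := by
        rw [← List.sum_map_mul_left]
        refine congrArg List.sum (List.map_congr_left ?_)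
        intro j hj
        have hjk : j < k := List.mem_range.mp hj
        have h2 : k + 1 - 1 - (j + 1) = k - 1 - j := by omega
        simp only [Function.comp, Nat.succ_eq_add_one, h2]
        ring
      rw [h1, ih]
      have hk : k + 1 - 1 - 0 = k := by omega
      simp only [pow_zero, hk, one_mul]
      ring

-- A's indexed sum over the reversed digit list equals pvVal
lemma index_sum (m : List Char) :
    ((List.range m.length).map (fun i => pvAdj (m.getD i ' ') * 9 ^ i)).sum = pvVal m := by
  induction m with
  | nil => simp [pvVal]
  | cons c m ih =>
      rw [List.length_cons, List.range_succ_eq_map]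
      simp only [List.map_cons, List.map_map, List.sum_cons, List.getD_cons_zero, pow_zero, mul_one]
      have h1 : ((List.range m.length).map ((fun i => pvAdj ((c :: m).getD i ' ') * 9 ^ i) ∘ Nat.succ)).sum
          = 9 * ((List.range m.length).map (fun i => pvAdj (m.getD i ' ') * 9 ^ i)).sum := by
        rw [← List.sum_map_mul_left]
        refine congrArg List.sum (List.map_congr_left ?_)
        intro j _
        simp only [Function.comp, Nat.succ_eq_add_one, List.getD_cons_succ]
        ring
      rw [h1, ih, pvVal]

-- A's whole fold over range(len(m)) equals pvVal m
lemma a_fold (m : List Char) :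
    (PySem.List.pyRange 0 (PySem.List.len m) 1).foldl (fun c i =>
      let d : Int := (PySem.Int.ofChars? [PySem.List.pyGetD m i ' ']).getD 0
      let Ntmp : Int := if d ≥ 4 then d - 1 else d
      if i > 0 then
        let diff : List Int :=
          (PySem.List.pyRange 0 i 1).map (fun j => (10 : Int) ^ j.toNat * (9 : Int) ^ (i - j - 1).toNat)
        c + Ntmp * ((10 : Int) ^ i.toNat - diff.sum)
      else
        c + Ntmp) 0 = pvVal m := by
  -- every step adds pvAdj (m[i]) * 9 ^ i
  have hstep : ∀ (c : Int) (i : Int), i ∈ PySem.List.pyRange 0 (PySem.List.len m) 1 →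
      (let d : Int := (PySem.Int.ofChars? [PySem.List.pyGetD m i ' ']).getD 0
       let Ntmp : Int := if d ≥ 4 then d - 1 else d
       if i > 0 then
         let diff : List Int :=
           (PySem.List.pyRange 0 i 1).map (fun j => (10 : Int) ^ j.toNat * (9 : Int) ^ (i - j - 1).toNat)
         c + Ntmp * ((10 : Int) ^ i.toNat - diff.sum)
       else
         c + Ntmp)
      = c + pvAdj (PySem.List.pyGetD m i ' ') * 9 ^ i.toNat := by
    intro c i hi
    have h0i : 0 ≤ i := (PySem.List.mem_pyRange_one.mp hi).1
    by_cases hpos : i > 0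
    · -- rewrite the diff sum to 10^i − 9^i via geo_sum
      have hdiff :
          ((PySem.List.pyRange 0 i 1).map (fun j => (10 : Int) ^ j.toNat * (9 : Int) ^ (i - j - 1).toNat)).sum
            = 10 ^ i.toNat - 9 ^ i.toNat := by
        rw [PySem.List.pyRange_one]
        simp only [sub_zero]
        rw [List.map_map]
        have hcong : ∀ j ∈ List.range i.toNat,
            ((fun j => (10 : Int) ^ j.toNat * (9 : Int) ^ (i - j - 1).toNat) ∘ (fun k : Nat => (0 : Int) + k)) j
              = (fun j => (10 : Int) ^ j * (9 : Int) ^ (i.toNat - 1 - j)) j := by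
          intro j hj
          have hji : j < i.toNat := List.mem_range.mp hj
          simp only [Function.comp, zero_add]
          congr 2
          omega
        rw [List.map_congr_left hcong, geo_sum]
      simp only [hpos, if_pos, hdiff]
      unfold pvAdj
      ring
    · have hi0 : i = 0 := le_antisymm (not_lt.mp hpos) h0i
      simp [hi0, pvAdj]
  rw [PySem.List.foldl_congr_mem _ _ _ _ hstep]
  -- now a plain additive fold: turn it into the indexed sum
  rw [PySem.List.foldl_add]
  simp only [PySem.List.len_eq, PySem.List.pyRange_one, sub_zero, Int.toNat_natCast,
    List.map_map]
  have hcong : ∀ j ∈ List.range m.length,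
      ((fun i : Int => pvAdj (PySem.List.pyGetD m i ' ') * 9 ^ i.toNat) ∘ (fun k : Nat => (0 : Int) + k)) j
        = (fun i => pvAdj (m.getD i ' ') * 9 ^ i) j := by
    intro j hj
    simp [Function.comp, PySem.List.pyGetD_natCast]
  rw [List.map_congr_left hcong, index_sum]
  simp

-- ===== VERDICT (by name: the statement is the Claim_ definition above) =====
theorem count_spec : Claim_equal_count := by
  intro N _ hpre
  unfold Spec_count count count_alt
  have hN : N > 0 := hpre
  rw [if_pos hN, if_pos hN]
  rw [PySem.List.slice?_none_none_neg_one]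
  simp only [Option.getD_some]
  rw [a_fold, horner_fold]
  simp
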